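-- pv_equiv track=rewrite | github.com/franrogers/unicloak | unicloak.py | unicloak
-- ===== SOURCE A (Python) =====
-- import math
--
-- invisible_chars = [u'\u200b', u'\u2060']  # , u'\u2063', u'\ufeff']
--
-- def base_n(num, n):
--     """Change a  to a base-n number.
--     Up to base-36 is supported without special notation."""
--     num_rep = {10: 'a', 11: 'b', 12: 'c', 13: 'd', 14: 'e', 15: 'f',
--                16: 'g', 17: 'h', 18: 'i', 19: 'j', 20: 'k', 21: 'l',
--                22: 'm', 23: 'n', 24: 'o', 25: 'p', 26: 'q', 27: 'r',
--                28: 's', 29: 't', 30: 'u', 31: 'v', 32: 'w', 33: 'x',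
--                34: 'y', 35: 'z'}
--     new_num_string = ''
--     current = num
--     while current != 0:
--         remainder = current % n
--         if 36 > remainder > 9:
--             remainder_string = num_rep[remainder]
--         elif remainder >= 36:
--             remainder_string = '({0})'.format(remainder)
--         else:
--             remainder_string = str(remainder)
--         new_num_string = remainder_string + new_num_string
--         current = current // n
--     return new_num_string
--
-- def unicloak(covert_text, overt_text):
--     """
--     Conceal covert_text within overt_text.
--     """
--
--     base = len(invisible_chars)
--     width = len(base_n(255, base))
--
--     def each(ch):
--         return base_n(ord(ch), base).zfill(width)
--
--     digits = ''.join(map(each, covert_text))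
--
--     invisible = ''.join(map(lambda ch: invisible_chars[int(ch, base)], digits))
--
--     overt_text = ''.join(filter(lambda ch: not ch in invisible_chars,
--                                 overt_text))
--
--     spaces_at = []
--     for i in range(len(overt_text)):
--         if overt_text[i] == ' ':
--             spaces_at.append(i)
--
--     steg_text = ''
--     invisible_pos, overt_pos, space_pos = 0, 0, 0
--     chunk_size = int(math.floor(len(invisible) / len(spaces_at) *
--                                 len(invisible)))  # TODO: need better algorithm
--     while space_pos < len(spaces_at):
--         steg_text += overt_text[overt_pos:spaces_at[space_pos]]
--
--         steg_text += invisible[invisible_pos:invisible_pos+chunk_size]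
--         invisible_pos += chunk_size
--
--         steg_text += overt_text[spaces_at[space_pos]]
--         overt_pos = spaces_at[space_pos] + 1
--         space_pos += 1
--     steg_text += overt_text[overt_pos:]
--
--     return steg_text
-- ===== SOURCE B (Python) =====
-- import math
--
-- invisible_chars = [u'\u200b', u'\u2060']
--
--
-- def unicloak(covert_text, overt_text):
--     """
--     Conceal covert_text within overt_text.
--     """
--     overt = ''.join(ch for ch in overt_text if ch not in invisible_chars)
--
--     # 8 invisible marks per covert char: its code's bits, most significant first.
--     invisible = ''.join(invisible_chars[(ord(ch) >> bit) & 1]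
--                         for ch in covert_text
--                         for bit in range(7, -1, -1))
--
--     chunk_size = int(math.floor(len(invisible) / overt.count(' ') *
--                                 len(invisible)))
--
--     pieces = []
--     pos = 0
--     for ch in overt:
--         if ch == ' ':
--             pieces.append(invisible[pos:pos + chunk_size])
--             pos += chunk_size
--         pieces.append(ch)
--     return ''.join(pieces)
-- ===== Notes on version B (the rewrite author's own statement) =====
-- stated objective: simpler
-- what changed: B drops A's spaces_at index table and index-slicing loop in favour of a single left-to-right scan of the overt text (inserting an invisible chunk at each space), and replaces A's base-2-string encoding pipeline (base_n/zfill/int(ch,2) lookups) by direct bit extraction from each character code.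
import Mathlib
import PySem

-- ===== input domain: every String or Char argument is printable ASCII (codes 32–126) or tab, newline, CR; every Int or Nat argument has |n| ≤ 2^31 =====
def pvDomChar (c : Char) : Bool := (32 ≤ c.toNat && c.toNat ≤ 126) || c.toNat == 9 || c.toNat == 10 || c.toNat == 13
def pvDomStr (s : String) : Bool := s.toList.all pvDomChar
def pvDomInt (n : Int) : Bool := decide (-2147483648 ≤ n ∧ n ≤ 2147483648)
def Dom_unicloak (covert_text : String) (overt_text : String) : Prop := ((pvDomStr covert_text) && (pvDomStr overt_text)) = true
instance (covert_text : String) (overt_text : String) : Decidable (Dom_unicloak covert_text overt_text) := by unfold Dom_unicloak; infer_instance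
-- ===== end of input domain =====

-- B replaces A's index-table pass (spaces_at + slicing) by one scan over the overt text and
-- A's base-2 string encoding (base_n/zfill/int(ch,2)) by direct bit extraction; objective: simpler.


-- ===== SHARED CONSTANT AND SHARED FLOAT ARITHMETIC =====
-- module constant invisible_chars = ['\u200b', '\u2060'] (both Pythons use it)
def invisibleChars : List Char := ['\u200B', '\u2060']

/- Both Pythons compute the identical expression
     `int(math.floor(len(invisible) / spaces * len(invisible)))`
   in IEEE-754 double arithmetic.  `pvChunkSize` is its exact integer model (both arguments
   are nonnegative and far below any double overflow on Dom-sized strings): round L/s to the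
   nearest double (ties to even), multiply by L and round again, then floor. -/
def pvRNE (n d : Nat) : Nat :=        -- round n/d to the nearest integer, ties to even
  let q := n / d
  let r := n % d
  if d < 2 * r ∨ (2 * r = d ∧ q % 2 = 1) then q + 1 else q

def pvQuotAt (num den : Nat) (s : Int) : Nat :=        -- ⌊num·2^s / den⌋
  if 0 ≤ s then num * 2 ^ s.toNat / den else num / (den * 2 ^ (-s).toNat)

def pvRoundDiv (num den : Nat) : Nat × Int :=        -- nearest double to num/den, as mant·2^exp
  if num = 0 then (0, 0) else
    let s0 : Int := 53 - ((PySem.Int.bitLength (num : Int) : Int) - PySem.Int.bitLength (den : Int))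
    let q0 := pvQuotAt num den s0
    let s : Int := if q0 < 2 ^ 52 then s0 + 1 else if 2 ^ 53 ≤ q0 then s0 - 1 else s0
    let n : Nat := if 0 ≤ s then num * 2 ^ s.toNat else num
    let d : Nat := if 0 ≤ s then den else den * 2 ^ (-s).toNat
    let q := pvRNE n d
    if q = 2 ^ 53 then (2 ^ 52, 1 - s) else (q, -s)

def pvRoundMul (m : Nat) (e : Int) (k : Nat) : Nat × Int :=        -- (m·2^e) * k, rounded to a double
  let p := m * k
  if p = 0 then (0, 0) else
    let bl := PySem.Int.bitLength (p : Int)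
    if bl ≤ 53 then (p, e) else
      let sh := bl - 53
      let q := pvRNE p (2 ^ sh)
      if q = 2 ^ 53 then (2 ^ 52, e + sh + 1) else (q, e + sh)

def pvChunkSize (L s : Nat) : Nat :=
  let me := pvRoundDiv L s
  let me' := pvRoundMul me.1 me.2 L
  if 0 ≤ me'.2 then me'.1 * 2 ^ me'.2.toNat else me'.1 / 2 ^ (-me'.2).toNat

-- ===== PORT A =====
-- the num_rep literal dict of base_n
def numRep : PySem.Dict Nat (List Char) := PySem.Dict.ofList
  [(10, ['a']), (11, ['b']), (12, ['c']), (13, ['d']), (14, ['e']), (15, ['f']),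
   (16, ['g']), (17, ['h']), (18, ['i']), (19, ['j']), (20, ['k']), (21, ['l']),
   (22, ['m']), (23, ['n']), (24, ['o']), (25, ['p']), (26, ['q']), (27, ['r']),
   (28, ['s']), (29, ['t']), (30, ['u']), (31, ['v']), (32, ['w']), (33, ['x']),
   (34, ['y']), (35, ['z'])]

-- base_n's while loop; fuel = num + 1 suffices (current strictly decreases while nonzero).
-- num is an ord / 255 here, hence a Nat; the dict lookup and getD defaults are unreachable
-- (remainder < n and the branch guards make every access valid).
def baseNGo (n : Nat) : Nat → Nat → List Char → List Char
  | 0, _, acc => acc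
  | fuel + 1, current, acc =>
    if current = 0 then acc
    else
      let remainder := current % n
      let remainderString : List Char :=
        if 9 < remainder ∧ remainder < 36 then (numRep.get? remainder).getD []
        else if 36 ≤ remainder then '(' :: PySem.Int.toChars (remainder : Int) ++ [')']
        else PySem.Int.toChars (remainder : Int)
      baseNGo n fuel (current / n) (remainderString ++ acc)

def baseN (num n : Nat) : List Char := baseNGo n (num + 1) num []

-- the while loop over spaces_at, carrying (overt_pos, invisible_pos, steg_text);
-- overt_text[spaces_at[p]] is a valid single-char index, its pyGet? is always some.
def cloakGo (overt invisible : List Char) (chunk : Nat) :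
    List Int → Int → Nat → List Char → List Char
  | [], overtPos, _, steg => steg ++ PySem.List.slice overt (some overtPos) none
  | i :: rest, overtPos, invisiblePos, steg =>
    let steg := steg ++ PySem.List.slice overt (some overtPos) (some i)
    let steg := steg ++ PySem.List.slice invisible (some (invisiblePos : Int))
        (some ((invisiblePos : Int) + (chunk : Int)))
    let steg := steg ++ ((PySem.List.pyGet? overt i).elim [] (fun c => [c]))
    cloakGo overt invisible chunk rest (i + 1) (invisiblePos + chunk) steg

def unicloak (covert_text : String) (overt_text : String) : String :=
  let base := invisibleChars.length
  let width := (baseN 255 base).length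
  let each := fun (ch : Char) => PySem.Chars.zfill (baseN ch.toNat base) (width : Int)
  let digits := PySem.Chars.join [] (covert_text.toList.map each)
  let invisible := PySem.Chars.join [] (digits.map (fun ch =>
      [PySem.List.pyGetD invisibleChars ((PySem.Int.ofCharsBase? [ch] (base : Int)).getD 0) ' ']))
  let overt := overt_text.toList.filter (fun ch => !(invisibleChars.contains ch))
  let spacesAt := (PySem.List.pyRange 0 (overt.length : Int) 1).foldl
      (fun acc i => if PySem.List.pyGet? overt i = some ' ' then acc ++ [i] else acc) []
  let chunkSize := pvChunkSize invisible.length spacesAt.length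
  String.ofList (cloakGo overt invisible chunkSize spacesAt 0 0 [])

-- ===== PORT B =====
def unicloak_alt (covert_text : String) (overt_text : String) : String :=
  let overt := overt_text.toList.filter (fun ch => !(invisibleChars.contains ch))
  let invisible := covert_text.toList.flatMap (fun ch =>
      (PySem.List.pyRange 7 (-1) (-1)).map (fun bit =>
        PySem.List.pyGetD invisibleChars (((ch.toNat >>> bit.toNat) &&& 1 : Nat) : Int) ' '))
  let chunkSize := pvChunkSize invisible.length (PySem.List.count overt ' ')
  let out := overt.foldl
      (fun (acc : List Char × Nat) ch =>
        if ch = ' ' then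
          (acc.1 ++ PySem.List.slice invisible (some (acc.2 : Int))
              (some ((acc.2 : Int) + (chunkSize : Int))) ++ [ch], acc.2 + chunkSize)
        else (acc.1 ++ [ch], acc.2))
      ([], 0)
  String.ofList out.1

-- ===== PRECONDITION & SPEC =====
-- A divides by len(spaces_at): on overt text without a space both Pythons raise ZeroDivisionError.
def Pre_unicloak (covert_text : String) (overt_text : String) : Prop := ' ' ∈ overt_text.toList
instance (covert_text : String) (overt_text : String) : Decidable (Pre_unicloak covert_text overt_text) := by unfold Pre_unicloak; infer_instance
def pvWitness_unicloak : String × String := ("hi", "a b")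

def Spec_unicloak (covert_text : String) (overt_text : String) (out : String) : Prop := out = unicloak_alt covert_text overt_text
instance (covert_text : String) (overt_text : String) (out : String) : Decidable (Spec_unicloak covert_text overt_text out) := by unfold Spec_unicloak; infer_instance

-- ===== CLAIM (what is proved, stated in full; the proofs are below) =====
def Claim_equal_unicloak : Prop := ∀ (covert_text : String) (overt_text : String), Dom_unicloak covert_text overt_text → Pre_unicloak covert_text overt_text → Spec_unicloak covert_text overt_text (unicloak covert_text overt_text)


-- ===== LEMMAS AND PROOFS =====

-- the indices of the spaces in a list of characters
def spaceIdx : List Char → List Nat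
  | [] => []
  | c :: cs => (if c = ' ' then [0] else []) ++ (spaceIdx cs).map (· + 1)

-- what B's scan produces from position `pos` on
def goB (invisible : List Char) (chunk : Nat) : List Char → Nat → List Char
  | [], _ => []
  | c :: cs, pos =>
    if c = ' ' then (invisible.drop pos).take chunk ++ c :: goB invisible chunk cs (pos + chunk)
    else c :: goB invisible chunk cs pos

theorem foldB_eq_goB (inv : List Char) (ch : Nat) (l : List Char) :
    ∀ (out : List Char) (pos : Nat),
      (l.foldl (fun (acc : List Char × Nat) c =>
        if c = ' ' then
          (acc.1 ++ PySem.List.slice inv (some (acc.2 : Int))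
              (some ((acc.2 : Int) + (ch : Int))) ++ [c], acc.2 + ch)
        else (acc.1 ++ [c], acc.2)) (out, pos)).1 = out ++ goB inv ch l pos := by
  induction l with
  | nil => intro out pos; simp [goB]
  | cons c cs ih =>
    intro out pos
    by_cases hc : c = ' '
    · subst hc
      simp only [List.foldl_cons]
      rw [ih, PySem.List.slice_natCast_add]
      simp [goB]
    · simp only [List.foldl_cons, if_neg hc]
      rw [ih]
      simp [goB, hc]

theorem length_spaceIdx (l : List Char) : (spaceIdx l).length = PySem.List.count l ' ' := by
  induction l with
  | nil => simp [spaceIdx, PySem.List.count_eq]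
  | cons c cs ih =>
    by_cases hc : c = ' ' <;>
      simp [spaceIdx, hc, PySem.List.count_eq] at * <;> omega

theorem spaceIdx_eq_filter_range (l : List Char) :
    (List.range l.length).filter
        (fun k : Nat => decide (PySem.List.pyGet? l (k : Int) = some ' ')) = spaceIdx l := by
  induction l with
  | nil => simp [spaceIdx]
  | cons c cs ih =>
    rw [List.length_cons, List.range_succ_eq_map, List.filter_cons, List.filter_map]
    have h0 : (PySem.List.pyGet? (c :: cs) ((0 : Nat) : Int)) = some c := by simp
    have hsucc : ((fun k : Nat => decide (PySem.List.pyGet? (c :: cs) (k : Int) = some ' '))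
        ∘ Nat.succ) = fun k : Nat => decide (PySem.List.pyGet? cs (k : Int) = some ' ') := by
      funext k
      simp [Function.comp]
    rw [hsucc, ih]
    by_cases hc : c = ' '
    · subst hc
      simp only [h0, spaceIdx]
      simp
    · simp only [h0, spaceIdx, if_neg hc]
      simp [hc]

theorem spacesAt_eq (l : List Char) :
    (PySem.List.pyRange 0 (l.length : Int) 1).foldl
      (fun acc i => if PySem.List.pyGet? l i = some ' ' then acc ++ [i] else acc) []
      = (spaceIdx l).map (fun n : Nat => (n : Int)) := by
  rw [PySem.List.foldl_append_ite_eq_filter, PySem.List.pyRange_one]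
  simp only [sub_zero, Int.toNat_natCast, zero_add, List.nil_append]
  rw [List.filter_map]
  have h : ((fun i : Int => decide (PySem.List.pyGet? l i = some ' ')) ∘ (fun k : Nat => (k : Int)))
      = fun k : Nat => decide (PySem.List.pyGet? l (k : Int) = some ' ') := rfl
  rw [h, spaceIdx_eq_filter_range]

theorem cloak_shift (inv : List Char) (ch : Nat) (c : Char) (cs : List Char) :
    ∀ (sp : List Nat) (op ip : Nat) (steg : List Char),
      cloakGo (c :: cs) inv ch (sp.map (fun n : Nat => ((n + 1 : Nat) : Int)))
          ((op + 1 : Nat) : Int) ip steg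
        = cloakGo cs inv ch (sp.map (fun n : Nat => (n : Int))) ((op : Nat) : Int) ip steg := by
  intro sp
  induction sp with
  | nil =>
    intro op ip steg
    simp only [List.map_nil, cloakGo]
    rw [PySem.List.slice_from_natCast, PySem.List.slice_from_natCast, List.drop_succ_cons]
  | cons i rest ih =>
    intro op ip steg
    simp only [List.map_cons, cloakGo]
    rw [PySem.List.slice_natCast, PySem.List.slice_natCast]
    rw [show ((i + 1 : Nat) : Int) + 1 = ((i + 1 + 1 : Nat) : Int) by push_cast; ring]
    rw [ih]
    rw [show ((i : Nat) : Int) + 1 = ((i + 1 : Nat) : Int) by push_cast; ring]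
    rw [show PySem.List.pyGet? (c :: cs) ((i + 1 : Nat) : Int)
        = PySem.List.pyGet? cs ((i : Nat) : Int) by simp [PySem.List.pyGet?_natCast]]
    congr 1
    simp [Nat.succ_sub_succ]

theorem cloak_cons (inv : List Char) (ch : Nat) (c : Char) (cs : List Char)
    (sp : List Nat) (ip : Nat) (steg : List Char) :
    cloakGo (c :: cs) inv ch ((sp.map (fun n : Nat => n + 1)).map (fun n : Nat => (n : Int)))
        (((0 : Nat)) : Int) ip steg
      = cloakGo cs inv ch (sp.map (fun n : Nat => (n : Int))) (((0 : Nat)) : Int) ip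
          (steg ++ [c]) := by
  rw [show (sp.map (fun n : Nat => n + 1)).map (fun n : Nat => (n : Int))
      = sp.map (fun n : Nat => ((n + 1 : Nat) : Int)) by simp]
  cases sp with
  | nil =>
    simp only [List.map_nil, cloakGo]
    rw [PySem.List.slice_from_natCast, PySem.List.slice_from_natCast]
    simp
  | cons i rest =>
    simp only [List.map_cons, cloakGo]
    rw [PySem.List.slice_natCast, PySem.List.slice_natCast]
    rw [show ((i + 1 : Nat) : Int) + 1 = ((i + 1 + 1 : Nat) : Int) by push_cast; ring]
    rw [cloak_shift]
    rw [show ((i : Nat) : Int) + 1 = ((i + 1 : Nat) : Int) by push_cast; ring]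
    rw [show PySem.List.pyGet? (c :: cs) ((i + 1 : Nat) : Int)
        = PySem.List.pyGet? cs ((i : Nat) : Int) by simp [PySem.List.pyGet?_natCast]]
    congr 1
    simp

theorem cloak_eq_goB (inv : List Char) (ch : Nat) (l : List Char) :
    ∀ (ip : Nat) (steg : List Char),
      cloakGo l inv ch ((spaceIdx l).map (fun n : Nat => (n : Int))) (((0 : Nat)) : Int) ip steg
        = steg ++ goB inv ch l ip := by
  induction l with
  | nil =>
    intro ip steg
    simp only [spaceIdx, List.map_nil, cloakGo]
    rw [PySem.List.slice_from_natCast]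
    simp [goB]
  | cons c cs ih =>
    intro ip steg
    by_cases hc : c = ' '
    · subst hc
      rw [show spaceIdx (' ' :: cs) = 0 :: (spaceIdx cs).map (· + 1) by simp [spaceIdx]]
      simp only [List.map_cons, cloakGo]
      rw [PySem.List.slice_natCast, PySem.List.slice_natCast_add]
      rw [show ((0 : Nat) : Int) + 1 = ((0 + 1 : Nat) : Int) by push_cast]
      rw [show ((spaceIdx cs).map (fun n => n + 1)).map (fun n : Nat => (n : Int))
          = (spaceIdx cs).map (fun n : Nat => ((n + 1 : Nat) : Int)) by simp]
      rw [cloak_shift, ih]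
      rw [show PySem.List.pyGet? (' ' :: cs) ((0 : Nat) : Int) = some ' ' by simp]
      simp [goB]
    · simp only [spaceIdx, if_neg hc, List.nil_append]
      rw [cloak_cons, ih]
      simp [goB, hc]

theorem joinNil_eq_flatten (parts : List (List Char)) :
    PySem.Chars.join [] parts = parts.flatten := by
  induction parts with
  | nil => simp [PySem.Chars.join_nil]
  | cons a rest ih =>
    cases rest with
    | nil => simp [PySem.Chars.join_singleton]
    | cons b r =>
      rw [PySem.Chars.join_cons_cons]
      simp only [List.flatten_cons]
      rw [ih]
      simp

-- per-character: A's base-2 digits mapped through invisible_chars = B's bit extraction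
theorem enc_char_eq : ∀ n : Nat, n < 128 →
    (PySem.Chars.zfill (baseN n 2) (((baseN 255 2).length : Nat) : Int)).map (fun c =>
        PySem.List.pyGetD invisibleChars ((PySem.Int.ofCharsBase? [c] 2).getD 0) ' ')
      = (PySem.List.pyRange 7 (-1) (-1)).map (fun bit =>
          PySem.List.pyGetD invisibleChars (((n >>> bit.toNat) &&& 1 : Nat) : Int) ' ') := by
  decide

theorem invisible_eq (l : List Char) (h : ∀ c ∈ l, c.toNat < 128) :
    PySem.Chars.join [] ((PySem.Chars.join [] (l.map (fun ch =>
        PySem.Chars.zfill (baseN ch.toNat invisibleChars.length)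
          (((baseN 255 invisibleChars.length).length : Nat) : Int)))).map (fun ch =>
      [PySem.List.pyGetD invisibleChars
          ((PySem.Int.ofCharsBase? [ch] (invisibleChars.length : Int)).getD 0) ' ']))
    = l.flatMap (fun ch => (PySem.List.pyRange 7 (-1) (-1)).map (fun bit =>
        PySem.List.pyGetD invisibleChars (((ch.toNat >>> bit.toNat) &&& 1 : Nat) : Int) ' ')) := by
  have hbase : invisibleChars.length = 2 := rfl
  rw [hbase]
  have hsingle : (fun ch : Char =>
      [PySem.List.pyGetD invisibleChars ((PySem.Int.ofCharsBase? [ch] ((2 : Nat) : Int)).getD 0) ' '])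
      = (fun x : Char => [x]) ∘ (fun ch : Char =>
        PySem.List.pyGetD invisibleChars ((PySem.Int.ofCharsBase? [ch] ((2 : Nat) : Int)).getD 0) ' ') := rfl
  rw [hsingle, ← List.map_map, PySem.Chars.join_nil_singletons, joinNil_eq_flatten,
    List.map_flatten, List.map_map, List.flatMap_def]
  congr 1
  apply List.map_congr_left
  intro c hcmem
  exact enc_char_eq c.toNat (h c hcmem)

-- ===== VERDICT (by name: the statement is the Claim_ definition above) =====
theorem unicloak_spec : Claim_equal_unicloak := by
  intro covert overt hdom _hpre
  unfold Spec_unicloak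
  simp only [unicloak, unicloak_alt]
  have hcov : ∀ c ∈ covert.toList, c.toNat < 128 := by
    have h1 : pvDomStr covert = true := by
      have h := hdom
      unfold Dom_unicloak at h
      exact (Bool.and_eq_true _ _ |>.mp h).1
    intro c hcmem
    have h2 := (List.all_eq_true.mp h1) c hcmem
    unfold pvDomChar at h2
    simp only [Bool.or_eq_true, Bool.and_eq_true, decide_eq_true_eq, beq_iff_eq] at h2
    omega
  have hcloak := cloak_eq_goB
  simp only [Nat.cast_zero] at hcloak
  rw [spacesAt_eq, invisible_eq _ hcov, hcloak, foldB_eq_goB,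
    List.length_map, length_spaceIdx]
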